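-- pv_equiv track=rewrite | github.com/RaresMarta/UBB | year 1/Fundamental Algorithms/Assignments/RMia28_A2/functions.py | filter_negative
-- ===== SOURCE A (Python) =====
-- def remove(my_list, index):
--     """
--     Description: Removes an element from the list located at a given index
--     input: my_list - list
--            index - int
--     Output: my_list - list
--     """
--     my_list.pop(index)
--     return my_list
--
-- def filter_negative(my_list):
--     """
--     Description: Modifies the list by keeping only the negative numbers and removing
--                  the other numbers
--     Input: my_list - list
--     Output: my_list - list
--     """
--     i = 0
--     while i < len(my_list):
--         if my_list[i] >= 0:
--             remove(my_list, i)
--         else: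
--             i = i + 1
--     return my_list
-- ===== SOURCE B (Python) =====
-- def filter_negative(my_list):
--     """Keep only the negative numbers in place: one forward pass with a write
--     cursor, then truncate — O(n) instead of A's repeated pop-and-shift."""
--     w = 0
--     for elem in my_list:
--         if not (elem >= 0):
--             my_list[w] = elem
--             w += 1
--     del my_list[w:]
--     return my_list
-- ===== Notes on version B (the rewrite author's own statement) =====
-- stated objective: faster
-- what changed: Replaces the while-loop that pops each non-negative element (each pop shifting the tail) with a single forward compaction pass using a write cursor followed by one truncation.
import Mathlib
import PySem

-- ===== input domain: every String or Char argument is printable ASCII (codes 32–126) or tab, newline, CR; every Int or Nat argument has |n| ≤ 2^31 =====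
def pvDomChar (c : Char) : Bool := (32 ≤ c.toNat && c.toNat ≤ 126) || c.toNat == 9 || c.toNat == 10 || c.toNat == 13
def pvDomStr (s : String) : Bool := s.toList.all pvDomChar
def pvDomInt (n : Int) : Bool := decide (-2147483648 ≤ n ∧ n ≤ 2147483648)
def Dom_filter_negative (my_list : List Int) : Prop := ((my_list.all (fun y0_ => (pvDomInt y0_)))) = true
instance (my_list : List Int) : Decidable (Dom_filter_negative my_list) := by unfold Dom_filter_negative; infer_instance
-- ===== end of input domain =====

-- B replaces A's pop-and-shift while loop by a single write-cursor compaction pass plus one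
-- truncation. Both A and B mutate the argument in place in Python; the equivalence proved
-- here is about the RETURN value (B performs the same in-place mutation).

-- ===== PORT A =====
-- the while loop: `remove(my_list, i)` = `my_list.pop(i)`; the guard `i < len(my_list)`
-- makes the pop always succeed, so the `none` branch is unreachable.
def filter_negative_loop (l : List Int) (i : Nat) : List Int :=
  if h : i < l.length then
    if l[i] ≥ 0 then
      match h2 : PySem.List.pop? l (i : Int) with
      | some (_, rest) => filter_negative_loop rest i
      | none => l
    else
      filter_negative_loop l (i + 1)
  else l
termination_by l.length - i
decreasing_by
  · have : rest.length + 1 = l.length := PySem.List.length_of_pop?_eq_some l h2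
    omega
  · omega

def filter_negative (my_list : List Int) : List Int :=
  filter_negative_loop my_list 0

-- ===== PORT B =====
-- the `for elem in my_list` loop of Source B: `arr` is the list being mutated by
-- `my_list[w] = elem`, `w` the write cursor; `if not (elem >= 0)` keeps the element.
def filter_alt_loop (arr : List Int) (elems : List Int) (w : Nat) : List Int × Nat :=
  match elems with
  | [] => (arr, w)
  | e :: es =>
      if ¬ (e ≥ 0) then filter_alt_loop (arr.set w e) es (w + 1)
      else filter_alt_loop arr es w

def filter_negative_alt (my_list : List Int) : List Int :=
  let p := filter_alt_loop my_list my_list 0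
  p.1.take p.2   -- `del my_list[w:]`

-- ===== PRECONDITION & SPEC =====
def Spec_filter_negative (my_list : List Int) (out : List Int) : Prop := out = filter_negative_alt my_list
instance (my_list : List Int) (out : List Int) : Decidable (Spec_filter_negative my_list out) := by unfold Spec_filter_negative; infer_instance

-- ===== CLAIM (what is proved, stated in full; the proofs are below) =====
def Claim_equal_filter_negative : Prop := ∀ (my_list : List Int), Dom_filter_negative my_list → Spec_filter_negative my_list (filter_negative my_list)

-- ===== LEMMAS AND PROOFS =====

theorem take_eraseIdx_of_lt (l : List Int) (i : Nat) (h : i < l.length) :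
    (l.eraseIdx i).take i = l.take i := by
  rw [List.eraseIdx_eq_take_drop_succ, List.take_append_of_le_length (by simp; omega),
    List.take_take]
  simp

theorem drop_eraseIdx_of_lt (l : List Int) (i : Nat) (h : i < l.length) :
    (l.eraseIdx i).drop i = l.drop (i + 1) := by
  rw [List.eraseIdx_eq_take_drop_succ, List.drop_append_of_le_length (by simp; omega)]
  simp

theorem loopA_eq (l : List Int) (i : Nat) :
    filter_negative_loop l i = l.take i ++ (l.drop i).filter (fun e => decide (e < 0)) := by
  induction l, i using filter_negative_loop.induct with
  | case1 l i h hge fst rest h2 ih =>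
      rw [PySem.List.pop?_natCast l i h] at h2
      have hrest : rest = l.eraseIdx i := by cases h2; rfl
      subst hrest
      rw [filter_negative_loop]
      simp only [h, dif_pos, hge, if_pos]
      split
      · next fst' rest' heq =>
          rw [PySem.List.pop?_natCast l i h] at heq
          have hrest' : rest' = l.eraseIdx i := by cases heq; rfl
          subst hrest'
          rw [ih, take_eraseIdx_of_lt l i h, drop_eraseIdx_of_lt l i h,
            List.drop_eq_getElem_cons h, List.filter_cons_of_neg (by simp; omega)]
      · next heq =>
          rw [PySem.List.pop?_natCast l i h] at heq
          exact absurd heq (by simp)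
  | case2 l i h hge h2 =>
      exfalso
      rw [PySem.List.pop?_natCast l i h] at h2
      exact (Option.some_ne_none _ h2)
  | case3 l i h hge ih =>
      rw [filter_negative_loop, dif_pos h, if_neg hge, ih]
      have htake : l.take (i + 1) = l.take i ++ [l[i]] := by
        rw [List.take_add_one, List.getElem?_eq_getElem h]; rfl
      rw [htake, List.drop_eq_getElem_cons h, List.filter_cons_of_pos (by simp; omega)]
      simp only [List.append_assoc, List.singleton_append]
  | case4 l i h =>
      rw [filter_negative_loop]
      simp only [h]
      have h1 : l.take i = l := List.take_of_length_le (by omega)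
      have h2 : l.drop i = [] := List.drop_eq_nil_of_le (by omega)
      simp [h1, h2]

theorem loopB_eq (es : List Int) (arr : List Int) (w : Nat)
    (hw : w + es.length ≤ arr.length) :
    (filter_alt_loop arr es w).1.take (filter_alt_loop arr es w).2
      = arr.take w ++ es.filter (fun e => decide (e < 0)) := by
  induction es generalizing arr w with
  | nil => simp [filter_alt_loop]
  | cons e es ih =>
      simp only [filter_alt_loop]
      by_cases h : e ≥ 0
      · have hlt : ¬ (e < 0) := by omega
        rw [if_neg (not_not_intro h)]
        rw [ih arr w (by simp at hw; omega)]
        simp [hlt]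
      · have hlt : e < 0 := by omega
        have hwlt : w < arr.length := by simp at hw; omega
        rw [if_pos h]
        rw [ih (arr.set w e) (w + 1) (by simp at hw ⊢; omega)]
        have hset : (arr.set w e).take (w + 1) = arr.take w ++ [e] := by
          rw [List.take_add_one, List.getElem?_set_self hwlt, List.take_set,
            List.set_eq_of_length_le (by rw [List.length_take]; omega)]
          rfl
        rw [hset]
        simp [hlt]

-- ===== VERDICT (by name: the statement is the Claim_ definition above) =====
theorem filter_negative_spec : Claim_equal_filter_negative := by
  intro my_list _
  unfold Spec_filter_negative filter_negative filter_negative_alt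
  rw [loopA_eq, loopB_eq my_list my_list 0 (by simp)]
  simp
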